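-- pv_equiv track=rewrite | github.com/PySheets/pysheets | static/dag.py | get_col_row_from_key
-- ===== SOURCE A (Python) =====
-- def get_col_row_from_key(key):
--     row = 0
--     col = 0
--     for c in key:
--         if c.isdigit():
--             row = row * 10 + int(c)
--         else:
--             col = col * 26 + ord(c) - ord("A") + 1
--     return col - 1, row - 1
-- ===== SOURCE B (Python) =====
-- def get_col_row_from_key(key):
--     letters = []
--     digits = []
--     for c in key:
--         if c.isdigit():
--             digits.append(c)
--         else:
--             letters.append(c)
--     col = 0
--     for c in letters:
--         col = col * 26 + (ord(c) - 64)
--     row = 0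
--     for c in digits:
--         row = row * 10 + int(c)
--     return col - 1, row - 1
-- ===== Notes on version B (the rewrite author's own statement) =====
-- stated objective: alternative
-- what changed: Replaces the single interleaved loop updating row and col together with a partition pass splitting the key into digit and non-digit characters, followed by two independent base-10 and base-26 folds.
import Mathlib
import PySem

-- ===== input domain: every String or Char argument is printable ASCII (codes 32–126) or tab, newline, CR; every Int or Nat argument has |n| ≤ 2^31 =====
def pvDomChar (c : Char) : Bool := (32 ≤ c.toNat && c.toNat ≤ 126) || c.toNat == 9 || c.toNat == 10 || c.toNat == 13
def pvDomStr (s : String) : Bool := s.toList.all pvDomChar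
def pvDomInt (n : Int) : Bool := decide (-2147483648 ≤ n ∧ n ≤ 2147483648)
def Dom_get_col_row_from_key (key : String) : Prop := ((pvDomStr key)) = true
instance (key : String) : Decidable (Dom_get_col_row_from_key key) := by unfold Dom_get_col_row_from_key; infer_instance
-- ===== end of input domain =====

-- B replaces A's single interleaved loop with a partition pass plus two independent folds (objective: alternative decomposition).

-- ===== PORT A =====
-- one pass, state (row, col); int(c) ported exactly as PySem.Int.ofChars? on the digit branch
def get_col_row_from_key (key : String) : Int × Int :=
  let rc : Int × Int := key.toList.foldl (fun rc c =>
    if PySem.Chars.isdigit c then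
      (rc.1 * 10 + (PySem.Int.ofChars? [c]).getD 0, rc.2)
    else
      (rc.1, rc.2 * 26 + (c.toNat : Int) - 65 + 1)) (0, 0)
  (rc.2 - 1, rc.1 - 1)

-- ===== PORT B =====
-- partition pass building (letters, digits), then a base-26 fold over letters and a base-10 fold over digits
def get_col_row_from_key_alt (key : String) : Int × Int :=
  let p : List Char × List Char := key.toList.foldl (fun p c =>
    if PySem.Chars.isdigit c then (p.1, p.2 ++ [c]) else (p.1 ++ [c], p.2)) ([], [])
  let col : Int := p.1.foldl (fun col c => col * 26 + ((c.toNat : Int) - 64)) 0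
  let row : Int := p.2.foldl (fun row c => row * 10 + (PySem.Int.ofChars? [c]).getD 0) 0
  (col - 1, row - 1)

-- ===== PRECONDITION & SPEC =====
def Spec_get_col_row_from_key (key : String) (out : Int × Int) : Prop := out = get_col_row_from_key_alt key
instance (key : String) (out : Int × Int) : Decidable (Spec_get_col_row_from_key key out) := by unfold Spec_get_col_row_from_key; infer_instance

-- ===== CLAIM (what is proved, stated in full; the proofs are below) =====
def Claim_equal_get_col_row_from_key : Prop := ∀ (key : String), Dom_get_col_row_from_key key → Spec_get_col_row_from_key key (get_col_row_from_key key)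

-- ===== LEMMAS AND PROOFS =====

-- B's partition fold equals the two filters of the list
lemma partition_fold_eq (l : List Char) (ls ds : List Char) :
    l.foldl (fun (p : List Char × List Char) c =>
      if PySem.Chars.isdigit c then (p.1, p.2 ++ [c]) else (p.1 ++ [c], p.2)) (ls, ds)
    = (ls ++ l.filter (fun c => !PySem.Chars.isdigit c), ds ++ l.filter (fun c => PySem.Chars.isdigit c)) := by
  induction l generalizing ls ds with
  | nil => simp
  | cons c t ih =>
    by_cases h : PySem.Chars.isdigit c = true <;>
      simp [List.foldl_cons, h, ih]

-- A's interleaved fold equals the pair of independent folds over the two filters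
lemma interleaved_fold_eq (l : List Char) (row col : Int) :
    l.foldl (fun (rc : Int × Int) c =>
      if PySem.Chars.isdigit c then
        (rc.1 * 10 + (PySem.Int.ofChars? [c]).getD 0, rc.2)
      else
        (rc.1, rc.2 * 26 + (c.toNat : Int) - 65 + 1)) (row, col)
    = ((l.filter (fun c => PySem.Chars.isdigit c)).foldl
         (fun row c => row * 10 + (PySem.Int.ofChars? [c]).getD 0) row,
       (l.filter (fun c => !PySem.Chars.isdigit c)).foldl
         (fun col c => col * 26 + ((c.toNat : Int) - 64)) col) := by
  induction l generalizing row col with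
  | nil => simp
  | cons c t ih =>
    by_cases h : PySem.Chars.isdigit c = true <;>
      simp [List.foldl_cons, h, ih] <;>
      congr 1 <;> omega

-- ===== VERDICT (by name: the statement is the Claim_ definition above) =====
theorem get_col_row_from_key_spec : Claim_equal_get_col_row_from_key := by
  intro key _
  unfold Spec_get_col_row_from_key get_col_row_from_key get_col_row_from_key_alt
  simp [partition_fold_eq, interleaved_fold_eq]
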